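-- pv_equiv track=rewrite | github.com/dtalluri/Python-Learning | exercises/inttostring.py | convint
-- ===== SOURCE A (Python) =====
-- def convint(x):
--     sum = 0
--     for i in range(0, len(x)):
--         if x[i] == "0":
--             sum = sum * 10
--         elif x[i] == '1':
--             sum = sum * 10 + 1
--         elif x[i] == '2':
--             sum = sum * 10 + 2
--         elif x[i] == '3':
--             sum = sum * 10 + 3
--         elif x[i] == '4':
--             sum = sum * 10 + 4
--         elif x[i] == '5':
--             sum = sum * 10 + 5
--         elif x[i] == '6':
--             sum = sum * 10 + 6
--         elif x[i] == '7':
--             sum = sum * 10 + 7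
--         elif x[i] == '8':
--             sum = sum * 10 + 8
--         elif x[i] == '9':
--             sum = sum * 10 + 9
--     return sum
-- ===== SOURCE B (Python) =====
-- def convint(x):
--     # Two phases: filter the digit characters, then sum positional weights back-to-front.
--     ds = [c for c in x if c in "0123456789"]
--     total = 0
--     for i, c in enumerate(reversed(ds)):
--         total += (ord(c) - 48) * 10 ** i
--     return total
-- ===== Notes on version B (the rewrite author's own statement) =====
-- stated objective: faster
-- what changed: Replaces the single Horner-style fold with a ten-way if-chain by a two-phase algorithm: filter the digit characters with a comprehension, then sum digit-value times 10**i over the reversed digit list (positional weights instead of repeated multiply-accumulate).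
import Mathlib
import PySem

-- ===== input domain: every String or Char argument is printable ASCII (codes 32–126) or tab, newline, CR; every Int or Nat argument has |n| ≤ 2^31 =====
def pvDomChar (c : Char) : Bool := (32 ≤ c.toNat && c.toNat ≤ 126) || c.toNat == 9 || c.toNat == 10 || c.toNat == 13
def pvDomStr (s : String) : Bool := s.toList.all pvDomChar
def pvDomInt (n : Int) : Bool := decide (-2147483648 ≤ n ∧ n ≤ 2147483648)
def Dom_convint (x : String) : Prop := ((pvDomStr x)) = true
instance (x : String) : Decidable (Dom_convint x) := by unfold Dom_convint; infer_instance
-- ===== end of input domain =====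

-- B filters the digit characters and sums positional weights back-to-front instead of
-- A's Horner-style multiply-accumulate with a ten-way if-chain; return values agree everywhere.

-- ===== PORT A =====
def convint (x : String) : Int :=
  x.toList.foldl (fun sum c =>
    if c = '0' then sum * 10
    else if c = '1' then sum * 10 + 1
    else if c = '2' then sum * 10 + 2
    else if c = '3' then sum * 10 + 3
    else if c = '4' then sum * 10 + 4
    else if c = '5' then sum * 10 + 5
    else if c = '6' then sum * 10 + 6
    else if c = '7' then sum * 10 + 7
    else if c = '8' then sum * 10 + 8
    else if c = '9' then sum * 10 + 9
    else sum) 0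

-- ===== PORT B =====
def convint_alt (x : String) : Int :=
  let ds := x.toList.filter (fun c => c ∈ ['0','1','2','3','4','5','6','7','8','9'])
  (PySem.List.enumerate ds.reverse 0).foldl
    (fun total p => total + ((p.2.toNat : Int) - 48) * 10 ^ p.1.toNat) 0

-- ===== PRECONDITION & SPEC =====
def Spec_convint (x : String) (out : Int) : Prop := out = convint_alt x
instance (x : String) (out : Int) : Decidable (Spec_convint x out) := by unfold Spec_convint; infer_instance

-- ===== CLAIM (what is proved, stated in full; the proofs are below) =====
def Claim_equal_convint : Prop := ∀ (x : String), Dom_convint x → Spec_convint x (convint x)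

-- ===== LEMMAS AND PROOFS =====

def pvVal (c : Char) : Int := (c.toNat : Int) - 48

-- little-endian value of a digit-character list (head = least significant)
def pvRval : List Char → Int
  | [] => 0
  | c :: t => pvVal c + 10 * pvRval t

lemma pvRval_append (l : List Char) (c : Char) :
    pvRval (l ++ [c]) = pvRval l + 10 ^ l.length * pvVal c := by
  induction l with
  | nil => simp [pvRval]
  | cons d t ih => simp [pvRval, ih, pow_succ]; ring

lemma pv_stepA (s : Int) (c : Char) :
    (if c = '0' then s * 10
     else if c = '1' then s * 10 + 1
     else if c = '2' then s * 10 + 2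
     else if c = '3' then s * 10 + 3
     else if c = '4' then s * 10 + 4
     else if c = '5' then s * 10 + 5
     else if c = '6' then s * 10 + 6
     else if c = '7' then s * 10 + 7
     else if c = '8' then s * 10 + 8
     else if c = '9' then s * 10 + 9
     else s)
    = if c ∈ ['0','1','2','3','4','5','6','7','8','9'] then s * 10 + pvVal c else s := by
  by_cases h0 : c = '0'; · subst h0; simp [pvVal]
  by_cases h1 : c = '1'; · subst h1; simp [pvVal]
  by_cases h2 : c = '2'; · subst h2; simp [pvVal]
  by_cases h3 : c = '3'; · subst h3; simp [pvVal]
  by_cases h4 : c = '4'; · subst h4; simp [pvVal]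
  by_cases h5 : c = '5'; · subst h5; simp [pvVal]
  by_cases h6 : c = '6'; · subst h6; simp [pvVal]
  by_cases h7 : c = '7'; · subst h7; simp [pvVal]
  by_cases h8 : c = '8'; · subst h8; simp [pvVal]
  by_cases h9 : c = '9'; · subst h9; simp [pvVal]
  simp [h0, h1, h2, h3, h4, h5, h6, h7, h8, h9]

lemma pv_horner (l : List Char) (a : Int) :
    l.foldl (fun s c => s * 10 + pvVal c) a = a * 10 ^ l.length + pvRval l.reverse := by
  induction l generalizing a with
  | nil => simp [pvRval]
  | cons c t ih =>
      simp only [List.foldl_cons, ih, List.reverse_cons, pvRval_append, List.length_reverse,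
        List.length_cons, pow_succ]
      ring

lemma pv_bfold (l : List Char) (s : Nat) (a : Int) :
    (PySem.List.enumerate l (s : Int)).foldl
      (fun total p => total + ((p.2.toNat : Int) - 48) * 10 ^ p.1.toNat) a
    = a + 10 ^ s * pvRval l := by
  induction l generalizing s a with
  | nil => simp [PySem.List.enumerate_nil, pvRval]
  | cons c t ih =>
      have hcast : (s : Int) + 1 = ((s + 1 : Nat) : Int) := by push_cast; ring
      rw [PySem.List.enumerate_cons, List.foldl_cons, hcast, ih]
      simp [pvRval, pvVal, Int.toNat_natCast, pow_succ]
      ring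

lemma pv_bfold0 (l : List Char) (a : Int) :
    (PySem.List.enumerate l 0).foldl
      (fun total p => total + ((p.2.toNat : Int) - 48) * 10 ^ p.1.toNat) a
    = a + pvRval l := by
  have h := pv_bfold l 0 a
  simpa using h

-- ===== VERDICT (by name: the statement is the Claim_ definition above) =====
theorem convint_spec : Claim_equal_convint := by
  intro x _
  show convint x = convint_alt x
  unfold convint convint_alt
  have hA : x.toList.foldl (fun sum c =>
      if c = '0' then sum * 10
      else if c = '1' then sum * 10 + 1
      else if c = '2' then sum * 10 + 2
      else if c = '3' then sum * 10 + 3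
      else if c = '4' then sum * 10 + 4
      else if c = '5' then sum * 10 + 5
      else if c = '6' then sum * 10 + 6
      else if c = '7' then sum * 10 + 7
      else if c = '8' then sum * 10 + 8
      else if c = '9' then sum * 10 + 9
      else sum) 0
      = (x.toList.filter (fun c => c ∈ ['0','1','2','3','4','5','6','7','8','9'])).foldl
          (fun s c => s * 10 + pvVal c) 0 := by
    rw [List.foldl_filter]
    congr 1
    funext s c
    rw [pv_stepA]
    by_cases h : c ∈ ['0','1','2','3','4','5','6','7','8','9'] <;> simp [h]
  rw [hA, pv_horner, pv_bfold0]
  simp
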